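-- pv_equiv track=rewrite | github.com/aneeshb005plr/Ingestion_worker | app/pipeline/table_converter.py | _remove_preceding_paragraph
-- ===== SOURCE A (Python) =====
-- def _remove_preceding_paragraph(result: list[str]) -> list[str]:
--     """
--     Remove the preceding context line from result after prepending to table rows.
--     Mirrors _get_preceding_paragraph priority exactly:
--       1. Remove plain text paragraph if found
--       2. Remove heading if it was used as fallback context
--
--     Why remove the heading fallback:
--       When heading is used as preceding_context, it gets prepended to
--       every table row. Leaving it in result would cause duplication —
--       the heading would appear both as a standalone line AND embedded
--       in each row's context.
--
--       Note: we only remove the heading if no plain text was found first,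
--       mirroring the exact fallback path of _get_preceding_paragraph.
--     """
--     last_heading_idx = None
--     for i in range(len(result) - 1, -1, -1):
--         stripped = result[i].strip()
--         if not stripped:
--             continue
--         if stripped.startswith("*") and stripped.endswith("*"):
--             continue
--         if " | " in stripped and ":" in stripped:
--             continue
--         if stripped.startswith("#"):
--             # Remember this heading index but keep looking for plain text
--             if last_heading_idx is None:
--                 last_heading_idx = i
--             continue
--         # Plain text found — remove it and return
--         result[i] = ""
--         return result
--
--     # No plain text found — remove the heading that was used as fallback
--     if last_heading_idx is not None:
--         result[last_heading_idx] = ""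
--     return result
-- ===== SOURCE B (Python) =====
-- def _remove_preceding_paragraph(result: list[str]) -> list[str]:
--     """Single forward pass: record the rightmost plain-text index and the
--     rightmost heading index, then blank plain text if found, else the heading.
--     Mutates and returns the same list object, like the original."""
--     last_plain = None
--     last_heading = None
--     for i, line in enumerate(result):
--         s = line.strip()
--         if not s:
--             continue
--         if s.startswith("*") and s.endswith("*"):
--             continue
--         if " | " in s and ":" in s:
--             continue
--         if s.startswith("#"):
--             last_heading = i
--         else:
--             last_plain = i
--     if last_plain is not None:
--         result[last_plain] = ""
--     elif last_heading is not None: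
--         result[last_heading] = ""
--     return result
-- ===== Notes on version B (the rewrite author's own statement) =====
-- stated objective: simpler
-- what changed: Replaces the reverse scan with early return plus a heading fallback by one forward pass that records the rightmost plain and rightmost heading index and does a single blank-out afterwards.
import Mathlib
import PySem

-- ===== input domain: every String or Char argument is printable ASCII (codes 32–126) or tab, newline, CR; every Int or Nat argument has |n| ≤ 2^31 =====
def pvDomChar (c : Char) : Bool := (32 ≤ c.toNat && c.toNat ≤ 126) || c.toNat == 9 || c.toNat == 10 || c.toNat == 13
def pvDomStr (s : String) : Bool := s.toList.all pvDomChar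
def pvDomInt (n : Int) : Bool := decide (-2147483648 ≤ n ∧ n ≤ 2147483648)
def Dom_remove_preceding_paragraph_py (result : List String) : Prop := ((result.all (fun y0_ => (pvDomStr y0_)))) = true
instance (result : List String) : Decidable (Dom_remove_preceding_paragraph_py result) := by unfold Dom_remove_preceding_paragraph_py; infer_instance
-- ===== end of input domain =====

-- B replaces A's reverse scan with early return by a single forward pass recording the
-- rightmost plain and rightmost heading index (simpler decomposition; return value equal;
-- both Pythons mutate the argument list in place in the same way).


-- ===== PORT A =====
-- reverse index loop of A: early return on plain text, remember first heading seen
def remove_preceding_paragraph_py_go (result : List String) (idxs : List Int)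
    (lastH : Option Int) : List String :=
  match idxs with
  | [] =>
    match lastH with
    | some j => PySem.List.pySetD result j ""
    | none => result
  | i :: rest =>
    let stripped := PySem.Str.strip (PySem.List.pyGetD result i "")
    if stripped = "" then
      remove_preceding_paragraph_py_go result rest lastH
    else if PySem.Str.startswith stripped "*" && PySem.Str.endswith stripped "*" then
      remove_preceding_paragraph_py_go result rest lastH
    else if PySem.Str.isIn " | " stripped && PySem.Str.isIn ":" stripped then
      remove_preceding_paragraph_py_go result rest lastH
    else if PySem.Str.startswith stripped "#" then
      remove_preceding_paragraph_py_go result rest (if lastH = none then some i else lastH)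
    else
      PySem.List.pySetD result i ""

def remove_preceding_paragraph_py (result : List String) : List String :=
  remove_preceding_paragraph_py_go result
    (PySem.List.pyRange ((result.length : Int) - 1) (-1) (-1)) none

-- ===== PORT B =====
-- forward pass: fold over enumerate(result) keeping (last_plain, last_heading), then one blank-out
def remove_preceding_paragraph_py_alt (result : List String) : List String :=
  let st := (PySem.List.enumerate result 0).foldl
    (fun (acc : Option Int × Option Int) p =>
      let s := PySem.Str.strip p.2
      if s = "" then acc
      else if PySem.Str.startswith s "*" && PySem.Str.endswith s "*" then acc
      else if PySem.Str.isIn " | " s && PySem.Str.isIn ":" s then acc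
      else if PySem.Str.startswith s "#" then (acc.1, some p.1)
      else (some p.1, acc.2))
    (none, none)
  match st.1 with
  | some i => PySem.List.pySetD result i ""
  | none =>
    match st.2 with
    | some j => PySem.List.pySetD result j ""
    | none => result

-- ===== PRECONDITION & SPEC =====
def Spec_remove_preceding_paragraph_py (result : List String) (out : List String) : Prop := out = remove_preceding_paragraph_py_alt result
instance (result : List String) (out : List String) : Decidable (Spec_remove_preceding_paragraph_py result out) := by unfold Spec_remove_preceding_paragraph_py; infer_instance

-- ===== CLAIM (what is proved, stated in full; the proofs are below) =====
def Claim_equal_remove_preceding_paragraph_py : Prop := ∀ (result : List String), Dom_remove_preceding_paragraph_py result → Spec_remove_preceding_paragraph_py result (remove_preceding_paragraph_py result)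

-- ===== LEMMAS AND PROOFS =====

-- line classification shared by both proofs
def rppSkip (t : String) : Bool :=
  t = "" || (PySem.Str.startswith t "*" && PySem.Str.endswith t "*")
    || (PySem.Str.isIn " | " t && PySem.Str.isIn ":" t)

def rppPlain (x : String) : Bool :=
  !rppSkip (PySem.Str.strip x) && !PySem.Str.startswith (PySem.Str.strip x) "#"

def rppHead (x : String) : Bool :=
  !rppSkip (PySem.Str.strip x) && PySem.Str.startswith (PySem.Str.strip x) "#"

-- rightmost index (offset s) whose element satisfies p
def rppLastIdx (p : String → Bool) : List String → Int → Option Int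
  | [], _ => none
  | x :: xs, s => Option.or (rppLastIdx p xs (s + 1)) (if p x then some s else none)

def rppFinish (result : List String) : Option Int → List String
  | some j => PySem.List.pySetD result j ""
  | none => result

theorem rppLastIdx_append_singleton (p : String → Bool) (xs : List String) (y : String) (s : Int) :
    rppLastIdx p (xs ++ [y]) s
      = Option.or (if p y then some (s + xs.length) else none) (rppLastIdx p xs s) := by
  induction xs generalizing s with
  | nil => simp [rppLastIdx]
  | cons x xs ih =>
    simp only [List.cons_append, rppLastIdx, ih, List.length_cons]
    rw [Option.or_assoc]
    congr 2
    push_cast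
    ring

theorem rppB_fold (xs : List String) (s : Int) (a b : Option Int) :
    (PySem.List.enumerate xs s).foldl
      (fun (acc : Option Int × Option Int) p =>
        let t := PySem.Str.strip p.2
        if t = "" then acc
        else if PySem.Str.startswith t "*" && PySem.Str.endswith t "*" then acc
        else if PySem.Str.isIn " | " t && PySem.Str.isIn ":" t then acc
        else if PySem.Str.startswith t "#" then (acc.1, some p.1)
        else (some p.1, acc.2)) (a, b)
    = (Option.or (rppLastIdx rppPlain xs s) a, Option.or (rppLastIdx rppHead xs s) b) := by
  induction xs generalizing s a b with
  | nil => simp [PySem.List.enumerate, rppLastIdx]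
  | cons x xs ih =>
    rw [PySem.List.enumerate_cons, List.foldl_cons]
    simp only []
    by_cases h1 : PySem.Str.strip x = ""
    · simp only [h1, if_pos rfl, ih, rppLastIdx, rppPlain, rppHead, rppSkip, h1]
      simp [Option.or_assoc]
    · by_cases h2 : (PySem.Str.startswith (PySem.Str.strip x) "*"
          && PySem.Str.endswith (PySem.Str.strip x) "*") = true
      · simp only [h1, if_neg h1, h2, if_pos h2, ih, rppLastIdx, rppPlain, rppHead, rppSkip]
        simp [h1, h2, Option.or_assoc]
      · by_cases h3 : (PySem.Str.isIn " | " (PySem.Str.strip x)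
            && PySem.Str.isIn ":" (PySem.Str.strip x)) = true
        · simp only [if_neg h1, if_pos h2, h3, ih, rppLastIdx, rppPlain, rppHead, rppSkip]
          simp [h1, h2, h3, Option.or_assoc]
        · by_cases h4 : PySem.Str.startswith (PySem.Str.strip x) "#" = true
          · simp only [if_neg h1, h2, h3, h4, if_pos h4, ih, rppLastIdx, rppPlain, rppHead, rppSkip]
            simp [h1, h2, h3, h4, Option.or_assoc]
          · simp only [if_neg h1, h2, h3, h4, ih, rppLastIdx, rppPlain, rppHead, rppSkip]
            simp [h1, h2, h3, h4, Option.or_assoc]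

theorem rppA_go (result : List String) (k : Nat) (hk : k ≤ result.length) (lastH : Option Int) :
    remove_preceding_paragraph_py_go result (PySem.List.pyRange ((k : Int) - 1) (-1) (-1)) lastH
      = rppFinish result
          (Option.or (rppLastIdx rppPlain (result.take k) 0)
            (Option.or lastH (rppLastIdx rppHead (result.take k) 0))) := by
  induction k generalizing lastH with
  | zero =>
    rw [PySem.List.pyRange_neg_one_eq_nil (by norm_num)]
    simp only [remove_preceding_paragraph_py_go, List.take_zero, rppLastIdx, Option.none_or,
      Option.or_none, rppFinish]
  | succ k ih =>
    have hklt : k < result.length := by omega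
    have hcons : PySem.List.pyRange (((k : Nat) + 1 : Int) - 1) (-1) (-1)
        = (k : Int) :: PySem.List.pyRange ((k : Int) - 1) (-1) (-1) := by
      have := PySem.List.pyRange_neg_one_cons (a := (k : Int)) (b := -1) (by omega)
      simpa using this
    have htake : result.take (k + 1) = result.take k ++ [result[k]] := by
      rw [List.take_succ, List.getElem?_eq_getElem hklt]; rfl
    have hget : PySem.List.pyGetD result ((k : Int)) "" = result[k] := by
      simp [PySem.List.pyGetD_natCast, List.getD, List.getElem?_eq_getElem hklt]
    have hlen : ((result.take k).length : Int) = (k : Int) := by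
      simp [List.length_take, Nat.min_eq_left (le_of_lt hklt)]
    have hplain : rppLastIdx rppPlain (result.take (k + 1)) 0
        = Option.or (if rppPlain result[k] then some (k : Int) else none)
            (rppLastIdx rppPlain (result.take k) 0) := by
      rw [htake, rppLastIdx_append_singleton]; rw [hlen]; ring_nf
    have hhead : rppLastIdx rppHead (result.take (k + 1)) 0
        = Option.or (if rppHead result[k] then some (k : Int) else none)
            (rppLastIdx rppHead (result.take k) 0) := by
      rw [htake, rppLastIdx_append_singleton]; rw [hlen]; ring_nf
    have hc1 : ((↑(k + 1) : Int) - 1) = ((k : Nat) + 1 : Int) - 1 := by push_cast; ring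
    rw [hc1, hcons]
    simp only [remove_preceding_paragraph_py_go, hget]
    by_cases h1 : PySem.Str.strip result[k] = ""
    · have hp : rppPlain result[k] = false := by clear ih hplain hhead hcons hget htake hlen hk; simp_all [rppPlain, rppSkip]
      have hh : rppHead result[k] = false := by clear ih hplain hhead hcons hget htake hlen hk; simp_all [rppHead, rppSkip]
      rw [if_pos h1, ih (by omega), hplain, hhead, hp, hh]
      simp
    · by_cases h2 : (PySem.Str.startswith (PySem.Str.strip result[k]) "*"
          && PySem.Str.endswith (PySem.Str.strip result[k]) "*") = true
      · have hp : rppPlain result[k] = false := by clear ih hplain hhead hcons hget htake hlen hk; simp_all [rppPlain, rppSkip]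
        have hh : rppHead result[k] = false := by clear ih hplain hhead hcons hget htake hlen hk; simp_all [rppHead, rppSkip]
        rw [if_neg h1, if_pos h2, ih (by omega), hplain, hhead, hp, hh]
        simp
      · by_cases h3 : (PySem.Str.isIn " | " (PySem.Str.strip result[k])
            && PySem.Str.isIn ":" (PySem.Str.strip result[k])) = true
        · have hp : rppPlain result[k] = false := by clear ih hplain hhead hcons hget htake hlen hk; simp_all [rppPlain, rppSkip]
          have hh : rppHead result[k] = false := by clear ih hplain hhead hcons hget htake hlen hk; simp_all [rppHead, rppSkip]
          rw [if_neg h1, if_neg h2, if_pos h3, ih (by omega), hplain, hhead, hp, hh]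
          simp
        · by_cases h4 : PySem.Str.startswith (PySem.Str.strip result[k]) "#" = true
          · have hskip : rppSkip (PySem.Str.strip result[k]) = false := by
              unfold rppSkip
              rw [decide_eq_false h1, Bool.eq_false_iff.mpr h2, Bool.eq_false_iff.mpr h3]
              rfl
            have hp : rppPlain result[k] = false := by
              unfold rppPlain; rw [h4]; simp
            have hh : rppHead result[k] = true := by
              unfold rppHead; rw [hskip, h4]; rfl
            have hlh : (if lastH = none then some ((k : Int)) else lastH)
                = Option.or lastH (some (k : Int)) := by cases lastH <;> rfl
            rw [if_neg h1, if_neg h2, if_neg h3, if_pos h4, hlh, ih (by omega),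
              hplain, hhead, hp, hh]
            simp only [if_neg (by simp : ¬ (false = true)), if_pos rfl, Option.none_or]
            rw [Option.or_assoc]
            simp
          · have hskip : rppSkip (PySem.Str.strip result[k]) = false := by
              unfold rppSkip
              rw [decide_eq_false h1, Bool.eq_false_iff.mpr h2, Bool.eq_false_iff.mpr h3]
              rfl
            have hp : rppPlain result[k] = true := by
              unfold rppPlain; rw [hskip, Bool.eq_false_iff.mpr h4]; rfl
            rw [if_neg h1, if_neg h2, if_neg h3, if_neg h4, hplain, hp]
            simp [rppFinish]

-- ===== VERDICT (by name: the statement is the Claim_ definition above) =====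
theorem remove_preceding_paragraph_py_spec : Claim_equal_remove_preceding_paragraph_py := by
  intro result _
  unfold Spec_remove_preceding_paragraph_py remove_preceding_paragraph_py
    remove_preceding_paragraph_py_alt
  rw [rppB_fold result 0 none none]
  have h := rppA_go result result.length (le_refl _) none
  rw [List.take_length] at h
  rw [show ((result.length : Int) - 1) = ((result.length : Nat) : Int) - 1 from rfl, h]
  simp only [Option.none_or]
  cases hp : rppLastIdx rppPlain result 0 <;>
    cases hh : rppLastIdx rppHead result 0 <;>
    simp [rppFinish, Option.or]
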